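-- pv_equiv track=rewrite | github.com/IControlP/Cash-Pedal-v1.02.3 | fuel_utils.py | estimate_mpg_for_vehicle
-- ===== SOURCE A (Python) =====
-- def estimate_mpg_for_vehicle(make: str, model: str, year: int) -> float:
--     """Estimate MPG for a vehicle (simplified implementation)"""
--
--     # This would ideally pull from a comprehensive fuel economy database
--     # For now, use simplified logic based on vehicle characteristics
--
--     model_lower = model.lower()
--
--     # Hybrid detection
--     if any(term in model_lower for term in ['hybrid', 'prius']):
--         return 45
--
--     # Electric detection (should use EV calculator instead)
--     if any(term in model_lower for term in ['electric', 'ev', 'volt', 'leaf']):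
--         return 0  # Use EV calculator
--
--     # Truck detection
--     if any(term in model_lower for term in ['silverado', 'f-150', 'ram', 'colorado', 'ranger', 'ridgeline']):
--         if 'colorado' in model_lower or 'ranger' in model_lower:
--             return 24  # Smaller trucks
--         return 20  # Full-size trucks
--
--     # SUV detection
--     if any(term in model_lower for term in ['suburban', 'tahoe', 'expedition', 'pilot', 'passport', 'santa fe']):
--         return 24
--
--     # Luxury vehicle detection
--     if make.lower() in ['bmw', 'mercedes-benz', 'audi', 'lexus', 'acura', 'infiniti']:
--         return 25
--
--     # Sports car detection
--     if any(term in model_lower for term in ['corvette', 'mustang', 'camaro', 'challenger']):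
--         return 22
--
--     # Compact car detection
--     if any(term in model_lower for term in ['civic', 'corolla', 'elantra', 'sentra']):
--         return 32
--
--     # Default sedan MPG
--     return 28
-- ===== SOURCE B (Python) =====
-- # Substring-dictionary scan: instead of searching the model for each keyword,
-- # walk the model once and hash-look-up each substring, keeping the minimal rank.
-- _KEYWORD_RANK = {
--     'hybrid': 0, 'prius': 0,
--     'electric': 1, 'ev': 1, 'volt': 1, 'leaf': 1,
--     'colorado': 2, 'ranger': 2,
--     'silverado': 3, 'f-150': 3, 'ram': 3, 'ridgeline': 3,
--     'suburban': 4, 'tahoe': 4, 'expedition': 4, 'pilot': 4, 'passport': 4, 'santa fe': 4,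
--     'corvette': 6, 'mustang': 6, 'camaro': 6, 'challenger': 6,
--     'civic': 7, 'corolla': 7, 'elantra': 7, 'sentra': 7,
-- }
-- _LUXURY_RANK = {'bmw': 5, 'mercedes-benz': 5, 'audi': 5, 'lexus': 5, 'acura': 5, 'infiniti': 5}
-- _RANK_MPG = [45, 0, 24, 20, 24, 25, 22, 32, 28]
-- _KEYLENS = sorted({len(k) for k in _KEYWORD_RANK})
--
-- def estimate_mpg_for_vehicle(make: str, model: str, year: int) -> float:
--     m = model.lower()
--     best = _LUXURY_RANK.get(make.lower(), 8)
--     for i in range(len(m)):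
--         for L in _KEYLENS:
--             r = _KEYWORD_RANK.get(m[i:i + L])
--             if r is not None and r < best:
--                 best = r
--     return _RANK_MPG[best]
-- ===== Notes on version B (the rewrite author's own statement) =====
-- stated objective: alternative
-- what changed: Instead of running A's ordered if-chain of per-keyword substring searches, B walks the model string once, hash-looks-up every substring of a keyword length in a keyword-to-rank dictionary while keeping a running minimum rank (make initialised via a luxury-make dictionary), and maps the final rank to the MPG.
import Mathlib
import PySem

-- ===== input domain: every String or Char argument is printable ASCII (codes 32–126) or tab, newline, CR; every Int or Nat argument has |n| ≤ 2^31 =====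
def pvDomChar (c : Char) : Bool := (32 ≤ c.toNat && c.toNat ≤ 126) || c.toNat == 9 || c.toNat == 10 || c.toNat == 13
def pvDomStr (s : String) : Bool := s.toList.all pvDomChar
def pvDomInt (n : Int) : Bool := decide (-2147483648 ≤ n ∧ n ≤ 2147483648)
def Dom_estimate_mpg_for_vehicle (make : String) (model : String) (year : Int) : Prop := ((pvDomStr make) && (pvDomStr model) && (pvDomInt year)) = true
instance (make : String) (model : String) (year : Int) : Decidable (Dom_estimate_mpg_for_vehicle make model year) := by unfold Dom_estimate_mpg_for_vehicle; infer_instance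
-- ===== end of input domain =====

-- B replaces A's per-keyword substring searches by a single scan of the model's
-- substrings against a keyword→rank dictionary with a running minimum (objective: alternative).

-- ===== PORT A =====
def estimate_mpg_for_vehicle (make : String) (model : String) (year : Int) : Int :=
  let model_lower := PySem.Str.lower model
  if ["hybrid", "prius"].any (fun t => PySem.Str.isIn t model_lower) then 45
  else if ["electric", "ev", "volt", "leaf"].any (fun t => PySem.Str.isIn t model_lower) then 0
  else if ["silverado", "f-150", "ram", "colorado", "ranger", "ridgeline"].any
      (fun t => PySem.Str.isIn t model_lower) then
    (if PySem.Str.isIn "colorado" model_lower || PySem.Str.isIn "ranger" model_lower then 24 else 20)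
  else if ["suburban", "tahoe", "expedition", "pilot", "passport", "santa fe"].any
      (fun t => PySem.Str.isIn t model_lower) then 24
  else if ["bmw", "mercedes-benz", "audi", "lexus", "acura", "infiniti"].contains
      (PySem.Str.lower make) then 25
  else if ["corvette", "mustang", "camaro", "challenger"].any (fun t => PySem.Str.isIn t model_lower) then 22
  else if ["civic", "corolla", "elantra", "sentra"].any (fun t => PySem.Str.isIn t model_lower) then 32
  else 28

-- ===== PORT B =====
-- keyword → rank of the rule group it belongs to (rank order = A's branch order)
def pvKwRank : PySem.Dict String Int := PySem.Dict.mk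
  [("hybrid", 0), ("prius", 0),
   ("electric", 1), ("ev", 1), ("volt", 1), ("leaf", 1),
   ("colorado", 2), ("ranger", 2),
   ("silverado", 3), ("f-150", 3), ("ram", 3), ("ridgeline", 3),
   ("suburban", 4), ("tahoe", 4), ("expedition", 4), ("pilot", 4), ("passport", 4), ("santa fe", 4),
   ("corvette", 6), ("mustang", 6), ("camaro", 6), ("challenger", 6),
   ("civic", 7), ("corolla", 7), ("elantra", 7), ("sentra", 7)]

def pvLuxRank : PySem.Dict String Int := PySem.Dict.mk
  [("bmw", 5), ("mercedes-benz", 5), ("audi", 5), ("lexus", 5), ("acura", 5), ("infiniti", 5)]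

def pvRankMpg : List Int := [45, 0, 24, 20, 24, 25, 22, 32, 28]

-- sorted({len(k) for k in _KEYWORD_RANK}) — module-level constant in Source B
def pvKeyLens : List Int := [2, 3, 4, 5, 6, 7, 8, 9, 10]

def estimate_mpg_for_vehicle_alt (make : String) (model : String) (year : Int) : Int :=
  let m := PySem.Str.lower model
  let best0 := pvLuxRank.getD (PySem.Str.lower make) 8
  let best := (PySem.List.pyRange 0 (PySem.Str.len m) 1).foldl (fun b i =>
      pvKeyLens.foldl (fun b L =>
        match pvKwRank.get? (PySem.Str.slice m (some i) (some (i + L))) with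
        | some r => if r < b then r else b
        | none => b) b) best0
  PySem.List.pyGetD pvRankMpg best 28

-- ===== PRECONDITION & SPEC =====
def Spec_estimate_mpg_for_vehicle (make : String) (model : String) (year : Int) (out : Int) : Prop := out = estimate_mpg_for_vehicle_alt make model year
instance (make : String) (model : String) (year : Int) (out : Int) : Decidable (Spec_estimate_mpg_for_vehicle make model year out) := by unfold Spec_estimate_mpg_for_vehicle; infer_instance

-- ===== CLAIM (what is proved, stated in full; the proofs are below) =====
def Claim_equal_estimate_mpg_for_vehicle : Prop := ∀ (make : String) (model : String) (year : Int), Dom_estimate_mpg_for_vehicle make model year → Spec_estimate_mpg_for_vehicle make model year (estimate_mpg_for_vehicle make model year)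

-- ===== LEMMAS AND PROOFS =====

-- running-minimum step and its fold
def pvUpd (b r : Int) : Int := if r < b then r else b
def pvMinf (b : Int) (vs : List Int) : Int := vs.foldl pvUpd b

-- the ranks of all dictionary hits over all substrings B inspects
def pvVals (m : String) : List Int :=
  (PySem.List.pyRange 0 (PySem.Str.len m) 1).flatMap (fun i =>
    pvKeyLens.filterMap (fun L => pvKwRank.get? (PySem.Str.slice m (some i) (some (i + L)))))

-- group test as A performs it
def pvG (ks : List String) (m : String) : Bool := ks.any (fun t => PySem.Str.isIn t m)

lemma pvFoldOpt {α : Type} (g : α → Option Int) (xs : List α) (b : Int) :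
    xs.foldl (fun b x => match g x with | some r => if r < b then r else b | none => b) b
      = (xs.filterMap g).foldl pvUpd b := by
  induction xs generalizing b with
  | nil => rfl
  | cons x xs ih =>
    simp only [List.foldl_cons, List.filterMap_cons]
    cases g x <;> simp [pvUpd, ih]

-- B's nested scan is the running minimum over pvVals
lemma pvAlt_eq (make model : String) (year : Int) :
    estimate_mpg_for_vehicle_alt make model year
      = PySem.List.pyGetD pvRankMpg
          (pvMinf (pvLuxRank.getD (PySem.Str.lower make) 8) (pvVals (PySem.Str.lower model))) 28 := by
  simp only [estimate_mpg_for_vehicle_alt, pvMinf, pvVals]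
  rw [List.foldl_flatMap]
  simp only [pvFoldOpt]

lemma pvMinf_le_init (b : Int) (vs : List Int) : pvMinf b vs ≤ b := by
  induction vs generalizing b with
  | nil => exact le_refl _
  | cons v vs ih =>
    simp only [pvMinf, List.foldl_cons] at *
    refine le_trans (ih _) ?_
    unfold pvUpd; split <;> omega

lemma pvMinf_le_mem {v : Int} {vs : List Int} (b : Int) (h : v ∈ vs) : pvMinf b vs ≤ v := by
  induction vs generalizing b with
  | nil => cases h
  | cons w vs ih =>
    simp only [pvMinf, List.foldl_cons] at *
    rcases List.mem_cons.mp h with rfl | h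
    · refine le_trans (pvMinf_le_init _ _) ?_
      unfold pvUpd; split <;> omega
    · exact ih _ h

lemma pvMinf_cases (b : Int) (vs : List Int) : pvMinf b vs = b ∨ pvMinf b vs ∈ vs := by
  induction vs generalizing b with
  | nil => exact Or.inl rfl
  | cons v vs ih =>
    simp only [pvMinf, List.foldl_cons] at *
    rcases ih (pvUpd b v) with h | h
    · rw [h]; unfold pvUpd; split
      · exact Or.inr (List.mem_cons_self)
      · exact Or.inl rfl
    · exact Or.inr (List.mem_cons_of_mem _ h)

lemma pvMinf_eq {r b : Int} {vs : List Int} (hmem : r = b ∨ r ∈ vs) (hinit : r ≤ b)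
    (hlb : ∀ v ∈ vs, r ≤ v) : pvMinf b vs = r := by
  refine le_antisymm ?_ ?_
  · rcases hmem with rfl | h
    · exact pvMinf_le_init _ _
    · exact pvMinf_le_mem _ h
  · rcases pvMinf_cases b vs with h | h
    · omega
    · exact hlb _ h

-- a rank is in pvVals iff some dictionary keyword occurs in m
lemma pvMem_vals (m : String) (r : Int) :
    r ∈ pvVals m ↔ ∃ k, pvKwRank.get? k = some r ∧ PySem.Str.isIn k m = true := by
  unfold pvVals
  simp only [List.mem_flatMap, List.mem_filterMap, PySem.List.mem_pyRange_one]
  constructor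
  · rintro ⟨i, ⟨hi0, hilen⟩, L, hL, hget⟩
    refine ⟨PySem.Str.slice m (some i) (some (i + L)), hget, ?_⟩
    have hL0 : 0 ≤ L := by fin_cases hL <;> norm_num
    rw [show PySem.Str.isIn (PySem.Str.slice m (some i) (some (i + L))) m
          = PySem.Chars.isIn (PySem.Str.slice m (some i) (some (i + L))).toList m.toList from rfl]
    rw [← PySem.Chars.exists_prefix_drop_iff_isIn]
    refine ⟨i.toNat, ?_⟩
    have hsl : (PySem.Str.slice m (some i) (some (i + L))).toList
        = List.take ((i + L).toNat - i.toNat) (List.drop i.toNat m.toList) := by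
      rw [PySem.Str.toList_slice, PySem.Chars.slice_eq_listSlice,
        PySem.List.slice_toNat _ hi0 (by omega)]
    rw [hsl]; exact List.take_prefix _ _
  · rintro ⟨k, hget, hin⟩
    have hitem := PySem.Dict.mem_items_of_get?_eq_some _ hget
    have hkey : ∀ p ∈ pvKwRank.items, p.1.toList ≠ [] ∧ ((p.1.toList.length : Int) ∈ pvKeyLens) := by
      decide
    obtain ⟨hne, hlen⟩ := hkey _ hitem
    rw [show PySem.Str.isIn k m = PySem.Chars.isIn k.toList m.toList from rfl,
      ← PySem.Chars.exists_prefix_drop_iff_isIn] at hin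
    obtain ⟨j, hpre⟩ := hin
    have hjlt : j < m.toList.length := by
      by_contra h
      rw [List.drop_eq_nil_of_le (by omega)] at hpre
      exact hne (List.prefix_nil.mp hpre)
    refine ⟨(j : Int), ⟨by positivity, ?_⟩, (k.toList.length : Int), hlen, ?_⟩
    · rw [PySem.Str.len_eq]; exact_mod_cast hjlt
    · have hsl : (PySem.Str.slice m (some (j : Int)) (some ((j : Int) + (k.toList.length : Int)))).toList
          = List.take k.toList.length (List.drop j m.toList) := by
        rw [PySem.Str.toList_slice, PySem.Chars.slice_eq_listSlice,
          PySem.List.slice_toNat _ (by positivity) (by positivity)]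
        congr 1
        omega
      have hk : PySem.Str.slice m (some (j : Int)) (some ((j : Int) + (k.toList.length : Int))) = k := by
        apply String.ext
        rw [hsl, ← List.prefix_iff_eq_take.mp hpre]
      rw [hk]; exact hget

-- rank r is hit iff one of its group's keywords occurs (instantiated per rank with `decide` facts)
lemma pvRank_char (m : String) (r : Int) (ks : List String)
    (h1 : ∀ p ∈ pvKwRank.items, p.2 = r → p.1 ∈ ks)
    (h2 : ∀ k ∈ ks, pvKwRank.get? k = some r) :
    r ∈ pvVals m ↔ pvG ks m = true := by
  rw [pvMem_vals]
  constructor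
  · rintro ⟨k, hget, hin⟩
    have hitem := PySem.Dict.mem_items_of_get?_eq_some _ hget
    exact List.any_eq_true.mpr ⟨k, h1 _ hitem rfl, hin⟩
  · intro h
    obtain ⟨k, hk, hin⟩ := List.any_eq_true.mp h
    exact ⟨k, h2 _ hk, hin⟩

lemma pvVals_ranks (m : String) : ∀ v ∈ pvVals m, v = 0 ∨ v = 1 ∨ v = 2 ∨ v = 3 ∨ v = 4 ∨ v = 6 ∨ v = 7 := by
  intro v hv
  obtain ⟨k, hget, -⟩ := (pvMem_vals m v).mp hv
  have hitem := PySem.Dict.mem_items_of_get?_eq_some _ hget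
  have hall : ∀ p ∈ pvKwRank.items, p.2 = 0 ∨ p.2 = 1 ∨ p.2 = 2 ∨ p.2 = 3 ∨ p.2 = 4 ∨ p.2 = 6 ∨ p.2 = 7 := by
    decide
  exact hall _ hitem

lemma pvLux_eq (mk : String) :
    pvLuxRank.getD mk 8
      = if ["bmw", "mercedes-benz", "audi", "lexus", "acura", "infiniti"].contains mk then 5 else 8 := by
  by_cases h : mk ∈ ["bmw", "mercedes-benz", "audi", "lexus", "acura", "infiniti"]
  · fin_cases h <;> decide
  · have hc : (["bmw", "mercedes-benz", "audi", "lexus", "acura", "infiniti"].contains mk) = false := by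
      simpa using h
    simp only [hc, Bool.false_eq_true, if_false]
    simp only [List.mem_cons, List.not_mem_nil, or_false, not_or] at h
    obtain ⟨n1, n2, n3, n4, n5, n6⟩ := h
    simp [pvLuxRank, PySem.Dict.getD_eq_get?_getD, beq_iff_eq, PySem.Dict.get?,
      Ne.symm n1, Ne.symm n2, Ne.symm n3, Ne.symm n4, Ne.symm n5, Ne.symm n6]

lemma pvTruck_split (m : String) :
    pvG ["silverado", "f-150", "ram", "colorado", "ranger", "ridgeline"] m
      = (pvG ["colorado", "ranger"] m || pvG ["silverado", "f-150", "ram", "ridgeline"] m) := by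
  simp only [pvG, List.any_cons, List.any_nil, Bool.or_false]
  cases PySem.Str.isIn "silverado" m <;> cases PySem.Str.isIn "f-150" m <;>
    cases PySem.Str.isIn "ram" m <;> cases PySem.Str.isIn "colorado" m <;>
    cases PySem.Str.isIn "ranger" m <;> cases PySem.Str.isIn "ridgeline" m <;> rfl

-- ===== VERDICT (by name: the statement is the Claim_ definition above) =====
theorem estimate_mpg_for_vehicle_spec : Claim_equal_estimate_mpg_for_vehicle := by
  intro make model year _
  unfold Spec_estimate_mpg_for_vehicle
  rw [pvAlt_eq make model year]
  have pvG_def : ∀ (ks : List String) (mm : String), (ks.any fun t => PySem.Str.isIn t mm) = pvG ks mm := fun _ _ => rfl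
  simp only [estimate_mpg_for_vehicle, pvG_def]
  have hinner : ∀ mm : String, (PySem.Str.isIn "colorado" mm || PySem.Str.isIn "ranger" mm) = pvG ["colorado", "ranger"] mm := by
    intro mm; simp [pvG]
  set m := PySem.Str.lower model with hm
  set mk := PySem.Str.lower make with hmk
  have hlux := pvLux_eq mk
  have hranks := pvVals_ranks m
  have hc0 := pvRank_char m 0 ["hybrid", "prius"] (by decide) (by decide)
  have hc1 := pvRank_char m 1 ["electric", "ev", "volt", "leaf"] (by decide) (by decide)
  have hc2 := pvRank_char m 2 ["colorado", "ranger"] (by decide) (by decide)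
  have hc3 := pvRank_char m 3 ["silverado", "f-150", "ram", "ridgeline"] (by decide) (by decide)
  have hc4 := pvRank_char m 4 ["suburban", "tahoe", "expedition", "pilot", "passport", "santa fe"] (by decide) (by decide)
  have hc6 := pvRank_char m 6 ["corvette", "mustang", "camaro", "challenger"] (by decide) (by decide)
  have hc7 := pvRank_char m 7 ["civic", "corolla", "elantra", "sentra"] (by decide) (by decide)
  by_cases h0 : pvG ["hybrid", "prius"] m = true
  · rw [if_pos h0, pvMinf_eq (Or.inr (hc0.mpr h0)) (by rw [hlux]; split <;> omega)
      (fun v hv => by rcases hranks v hv with h|h|h|h|h|h|h <;> omega)]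
    decide
  · by_cases h1 : pvG ["electric", "ev", "volt", "leaf"] m = true
    · rw [if_neg h0, if_pos h1, pvMinf_eq (Or.inr (hc1.mpr h1)) (by rw [hlux]; split <;> omega)
        (fun v hv => by rcases hranks v hv with rfl|rfl|rfl|rfl|rfl|rfl|rfl <;>
          first | omega | exact absurd (hc0.mp hv) h0)]
      decide
    · rw [if_neg h0, if_neg h1, pvTruck_split m, hinner m]
      by_cases h2 : pvG ["colorado", "ranger"] m = true
      · rw [if_pos (by simp [h2]), if_pos h2,
          pvMinf_eq (Or.inr (hc2.mpr h2)) (by rw [hlux]; split <;> omega)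
          (fun v hv => by rcases hranks v hv with rfl|rfl|rfl|rfl|rfl|rfl|rfl <;>
            first | omega | exact absurd (hc0.mp hv) h0 | exact absurd (hc1.mp hv) h1)]
        decide
      · by_cases h3 : pvG ["silverado", "f-150", "ram", "ridgeline"] m = true
        · rw [if_pos (by simp [h3]), if_neg h2,
            pvMinf_eq (Or.inr (hc3.mpr h3)) (by rw [hlux]; split <;> omega)
            (fun v hv => by rcases hranks v hv with rfl|rfl|rfl|rfl|rfl|rfl|rfl <;>
              first | omega | exact absurd (hc0.mp hv) h0 | exact absurd (hc1.mp hv) h1 |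
                exact absurd (hc2.mp hv) h2)]
          decide
        · rw [if_neg (by simp [h2, h3])]
          by_cases h4 : pvG ["suburban", "tahoe", "expedition", "pilot", "passport", "santa fe"] m = true
          · rw [if_pos h4, pvMinf_eq (Or.inr (hc4.mpr h4)) (by rw [hlux]; split <;> omega)
              (fun v hv => by rcases hranks v hv with rfl|rfl|rfl|rfl|rfl|rfl|rfl <;>
                first | omega | exact absurd (hc0.mp hv) h0 | exact absurd (hc1.mp hv) h1 |
                  exact absurd (hc2.mp hv) h2 | exact absurd (hc3.mp hv) h3)]
            decide
          · rw [if_neg h4, hlux]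
            by_cases hL : (["bmw", "mercedes-benz", "audi", "lexus", "acura", "infiniti"].contains mk) = true
            · rw [if_pos hL, if_pos hL, pvMinf_eq (Or.inl rfl) le_rfl
                (fun v hv => by rcases hranks v hv with rfl|rfl|rfl|rfl|rfl|rfl|rfl <;>
                  first | omega | exact absurd (hc0.mp hv) h0 | exact absurd (hc1.mp hv) h1 |
                    exact absurd (hc2.mp hv) h2 | exact absurd (hc3.mp hv) h3 |
                    exact absurd (hc4.mp hv) h4)]
              decide
            · rw [if_neg hL, if_neg hL]
              by_cases h6 : pvG ["corvette", "mustang", "camaro", "challenger"] m = true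
              · rw [if_pos h6, pvMinf_eq (Or.inr (hc6.mpr h6)) (by omega)
                  (fun v hv => by rcases hranks v hv with rfl|rfl|rfl|rfl|rfl|rfl|rfl <;>
                    first | omega | exact absurd (hc0.mp hv) h0 | exact absurd (hc1.mp hv) h1 |
                      exact absurd (hc2.mp hv) h2 | exact absurd (hc3.mp hv) h3 |
                      exact absurd (hc4.mp hv) h4)]
                decide
              · by_cases h7 : pvG ["civic", "corolla", "elantra", "sentra"] m = true
                · rw [if_neg h6, if_pos h7, pvMinf_eq (Or.inr (hc7.mpr h7)) (by omega)
                    (fun v hv => by rcases hranks v hv with rfl|rfl|rfl|rfl|rfl|rfl|rfl <;>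
                      first | omega | exact absurd (hc0.mp hv) h0 | exact absurd (hc1.mp hv) h1 |
                        exact absurd (hc2.mp hv) h2 | exact absurd (hc3.mp hv) h3 |
                        exact absurd (hc4.mp hv) h4 | exact absurd (hc6.mp hv) h6)]
                  decide
                · rw [if_neg h6, if_neg h7, pvMinf_eq (Or.inl rfl) le_rfl
                    (fun v hv => by rcases hranks v hv with rfl|rfl|rfl|rfl|rfl|rfl|rfl <;>
                      first | omega | exact absurd (hc0.mp hv) h0 | exact absurd (hc1.mp hv) h1 |
                        exact absurd (hc2.mp hv) h2 | exact absurd (hc3.mp hv) h3 |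
                        exact absurd (hc4.mp hv) h4 | exact absurd (hc6.mp hv) h6 |
                        exact absurd (hc7.mp hv) h7)]
                  decide
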